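-- pv_equiv track=rewrite | github.com/Ing-Josef-Klotzner/python | 2017/hackerrank/divisibleNumbers_hopTop.py | getDgtCnt
-- ===== SOURCE A (Python) =====
-- def getDgtCnt (m):
--     m = abs (m)
--     cnt = 0
--     while (m != 0):
--         m = m // 10
--         cnt += 1
--     if cnt == 0: cnt = 1
--     return cnt
-- ===== SOURCE B (Python) =====
-- def getDgtCnt(m):
--     return len(str(abs(m)))
-- ===== Notes on version B (the rewrite author's own statement) =====
-- stated objective: simpler
-- what changed: Replaces the explicit divide-by-10 counting loop (with the cnt==0 special case) by a single expression len(str(abs(m))), relying on the decimal string representation.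
import Mathlib
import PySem

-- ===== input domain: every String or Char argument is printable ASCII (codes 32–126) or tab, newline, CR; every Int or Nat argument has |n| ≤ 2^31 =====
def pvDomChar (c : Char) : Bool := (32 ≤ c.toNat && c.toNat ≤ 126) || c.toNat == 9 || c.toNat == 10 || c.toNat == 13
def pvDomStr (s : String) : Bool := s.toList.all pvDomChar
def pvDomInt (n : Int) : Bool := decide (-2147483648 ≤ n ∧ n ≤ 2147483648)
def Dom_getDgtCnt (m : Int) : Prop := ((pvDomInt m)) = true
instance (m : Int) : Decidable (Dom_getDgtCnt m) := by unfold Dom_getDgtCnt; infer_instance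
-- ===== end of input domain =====

-- B replaces A's divide-by-10 counting loop by len(str(abs(m))); objective: simpler.

-- ===== PORT A =====
-- the while loop of A: state is (m, cnt); after 'm = abs(m)' the loop variable is
-- nonnegative, so it is carried as a Nat (floordiv on nonnegatives is Nat division)
def getDgtCntLoop (m : Nat) (cnt : Int) : Int :=
  if m ≠ 0 then getDgtCntLoop (m / 10) (cnt + 1) else cnt
  decreasing_by exact Nat.div_lt_self (Nat.pos_of_ne_zero (by assumption)) (by omega)

def getDgtCnt (m : Int) : Int :=
  let cnt := getDgtCntLoop m.natAbs 0
  if cnt = 0 then 1 else cnt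

-- ===== PORT B =====
def getDgtCnt_alt (m : Int) : Int := PySem.Str.len (PySem.Int.toStr |m|)

-- ===== PRECONDITION & SPEC =====
def Spec_getDgtCnt (m : Int) (out : Int) : Prop := out = getDgtCnt_alt m
instance (m : Int) (out : Int) : Decidable (Spec_getDgtCnt m out) := by unfold Spec_getDgtCnt; infer_instance

-- ===== CLAIM (what is proved, stated in full; the proofs are below) =====
def Claim_equal_getDgtCnt : Prop := ∀ (m : Int), Dom_getDgtCnt m → Spec_getDgtCnt m (getDgtCnt m)

-- ===== LEMMAS AND PROOFS =====

theorem getDgtCntLoop_add (n : Nat) (c : Int) :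
    getDgtCntLoop n c = c + getDgtCntLoop n 0 := by
  induction n using Nat.strong_induction_on generalizing c with
  | _ n ih =>
    by_cases h : n = 0
    · subst h
      rw [getDgtCntLoop]
      simp only [ne_eq, not_true_eq_false, if_false]
      rw [getDgtCntLoop]
      simp
    · rw [getDgtCntLoop]
      conv_rhs => rw [getDgtCntLoop]
      simp only [h, ne_eq, not_false_eq_true, if_true]
      rw [ih (n / 10) (Nat.div_lt_self (Nat.pos_of_ne_zero h) (by omega)),
          ih (n / 10) (Nat.div_lt_self (Nat.pos_of_ne_zero h) (by omega)) (c := 0 + 1)]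
      ring

theorem getDgtCntLoop_eq_toDigitsCore_len (f : Nat) :
    ∀ n : Nat, n < f → 0 < n →
    getDgtCntLoop n 0 = ((Nat.toDigitsCore 10 f n []).length : Int) := by
  induction f with
  | zero => intro n h; omega
  | succ f ih =>
    intro n hlt hpos
    rw [getDgtCntLoop]
    simp only [ne_eq, Nat.pos_iff_ne_zero.mp hpos, not_false_eq_true, if_true]
    rw [getDgtCntLoop_add]
    simp only [Nat.toDigitsCore]
    by_cases h10 : n / 10 = 0
    · simp [h10, getDgtCntLoop]
    · simp only [h10, if_false]
      rw [Nat.toDigitsCore_lens_eq]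
      have hn10 : 0 < n / 10 := Nat.pos_of_ne_zero h10
      have hlt' : n / 10 < f := by
        have h10n : 10 ≤ n := by
          by_contra h; push Not at h
          exact h10 (Nat.div_eq_of_lt h)
        have := Nat.div_lt_self hpos (show 1 < 10 by omega)
        omega
      rw [ih (n / 10) hlt' hn10]
      push_cast
      ring

theorem getDgtCntLoop_eq_toDigits_len (n : Nat) (hpos : 0 < n) :
    getDgtCntLoop n 0 = ((Nat.toDigits 10 n).length : Int) :=
  getDgtCntLoop_eq_toDigitsCore_len (n + 1) n (Nat.lt_succ_self n) hpos

theorem getDgtCnt_alt_eq (m : Int) :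
    getDgtCnt_alt m = ((Nat.toDigits 10 m.natAbs).length : Int) := by
  unfold getDgtCnt_alt
  rw [PySem.Str.len_eq]
  have h1 : (PySem.Int.toStr |m|).toList = PySem.Int.toChars |m| := PySem.Int.toList_toStr _
  rw [h1]
  unfold PySem.Int.toChars
  have hnn : ¬ |m| < 0 := not_lt.mpr (abs_nonneg m)
  simp only [hnn, if_false]
  have : |m|.toNat = m.natAbs := by
    rw [Int.abs_eq_natAbs]; exact Int.toNat_natCast _
  rw [this]

theorem toDigits_len_pos (n : Nat) : 0 < (Nat.toDigits 10 n).length := by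
  unfold Nat.toDigits
  rw [Nat.toDigitsCore]
  by_cases h : n / 10 = 0
  · simp [h]
  · simp only [h, if_false]
    rw [Nat.toDigitsCore_lens_eq]
    omega

-- ===== VERDICT (by name: the statement is the Claim_ definition above) =====
theorem getDgtCnt_spec : Claim_equal_getDgtCnt := by
  intro m _
  unfold Spec_getDgtCnt getDgtCnt
  rw [getDgtCnt_alt_eq]
  by_cases h : m.natAbs = 0
  · simp [h, getDgtCntLoop]
  · have hpos : 0 < m.natAbs := Nat.pos_of_ne_zero h
    rw [getDgtCntLoop_eq_toDigits_len m.natAbs hpos]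
    have hlen : 0 < (Nat.toDigits 10 m.natAbs).length := toDigits_len_pos m.natAbs
    have hne : ((Nat.toDigits 10 m.natAbs).length : Int) ≠ 0 := by
      exact_mod_cast Nat.pos_iff_ne_zero.mp hlen
    rw [if_neg hne]
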